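-- pv_equiv track=rewrite | github.com/sree-sivani/ABHYAS-PRACTICE-QUESTIONS-25 | program22.py | sum_even_digits
-- ===== SOURCE A (Python) =====
-- def sum_even_digits(num):
--
--
--     while num > 9:
--         sum = 0
--         while num > 0:
--             digit = num % 10
--             if digit % 2 == 0:
--                 sum += digit
--             num //= 10
--         num = sum
--
--     return num
-- ===== SOURCE B (Python) =====
-- def sum_even_digits(num):
--     if num <= 9:
--         return num
--     return sum_even_digits(sum(int(d) for d in str(num) if int(d) % 2 == 0))
-- ===== Notes on version B (the rewrite author's own statement) =====
-- stated objective: simpler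
-- what changed: Replaces the two nested while-loops with accumulator variables by a two-line recursive fixpoint whose inner even-digit sum is a comprehension over str(num).
import Mathlib
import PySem

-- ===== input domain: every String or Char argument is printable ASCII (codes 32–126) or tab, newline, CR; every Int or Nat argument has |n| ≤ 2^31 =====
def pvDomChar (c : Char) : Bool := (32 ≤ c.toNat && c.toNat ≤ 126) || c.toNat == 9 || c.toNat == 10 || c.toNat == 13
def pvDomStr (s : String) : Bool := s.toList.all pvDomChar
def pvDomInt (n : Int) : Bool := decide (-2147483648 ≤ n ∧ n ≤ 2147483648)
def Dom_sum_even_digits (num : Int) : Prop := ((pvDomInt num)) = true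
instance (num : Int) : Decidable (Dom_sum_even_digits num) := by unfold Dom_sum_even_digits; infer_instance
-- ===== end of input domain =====

-- B replaces A's two nested while-loops with a two-line recursive fixpoint whose inner
-- even-digit sum is a comprehension over str(num) (objective: simpler).


-- ===== PORT A =====
-- inner `while num > 0` loop of A with its accumulator `sum`; the fuel argument only
-- makes the recursion structural (num.toNat + 1 steps always suffice, proved below)
def sumEvenLoopF : Nat → Int → Int → Int
  | 0, _, sum => sum
  | f + 1, num, sum =>
    if num > 0 then
      sumEvenLoopF f (PySem.Int.floordiv num 10)
        (if PySem.Int.mod (PySem.Int.mod num 10) 2 = 0 then sum + PySem.Int.mod num 10 else sum)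
    else sum

def sumEvenLoop (num sum : Int) : Int := sumEvenLoopF (num.toNat + 1) num sum

-- outer `while num > 9` loop of A (same fuel device; never exhausted, proved below)
def sumEvenOuterF : Nat → Int → Int
  | 0, num => num
  | f + 1, num => if num > 9 then sumEvenOuterF f (sumEvenLoop num 0) else num

def sum_even_digits (num : Int) : Int := sumEvenOuterF (num.toNat + 1) num

-- ===== PORT B =====
-- int(d) for a single digit character d (exact on digit chars, the only ones reached)
def charVal (c : Char) : Int := (c.toNat : Int) - 48

-- sum(int(d) for d in cs if int(d) % 2 == 0)
def evenCharsSum (cs : List Char) : Int :=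
  ((cs.filter (fun d => PySem.Int.mod (charVal d) 2 == 0)).map charVal).sum

-- B's recursive fixpoint (fuel makes it structural; num.toNat + 1 steps suffice, proved below)
def sumEvenAltF : Nat → Int → Int
  | 0, num => num
  | f + 1, num =>
    if num ≤ 9 then num else sumEvenAltF f (evenCharsSum (PySem.Int.toStr num).toList)

def sum_even_digits_alt (num : Int) : Int := sumEvenAltF (num.toNat + 1) num

-- ===== PRECONDITION & SPEC =====
def Spec_sum_even_digits (num : Int) (out : Int) : Prop := out = sum_even_digits_alt num
instance (num : Int) (out : Int) : Decidable (Spec_sum_even_digits num out) := by unfold Spec_sum_even_digits; infer_instance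

-- ===== CLAIM (what is proved, stated in full; the proofs are below) =====
def Claim_equal_sum_even_digits : Prop := ∀ (num : Int), Dom_sum_even_digits num → Spec_sum_even_digits num (sum_even_digits num)

-- ===== LEMMAS AND PROOFS =====
-- mathematical even-digit sum, the common value of A's inner loop and B's comprehension
def evenN (n : Nat) : Nat :=
  if h : n = 0 then 0 else (if n % 10 % 2 = 0 then n % 10 else 0) + evenN (n / 10)
termination_by n
decreasing_by exact Nat.div_lt_self (Nat.pos_of_ne_zero h) (by norm_num)

theorem evenN_zero : evenN 0 = 0 := by rw [evenN]; simp

theorem evenN_le (n : Nat) : evenN n ≤ n := by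
  induction n using Nat.strong_induction_on with
  | _ n ih =>
    rw [evenN]
    split
    · omega
    · rename_i h
      have := ih (n / 10) (Nat.div_lt_self (Nat.pos_of_ne_zero h) (by norm_num))
      split <;> omega

theorem evenN_lt (n : Nat) (h : 10 ≤ n) : evenN n < n := by
  rw [evenN]
  have := evenN_le (n / 10)
  split
  · omega
  · split <;> omega

theorem sumEvenLoopF_eq (f : Nat) : ∀ (num sum : Int), num.toNat < f →
    sumEvenLoopF f num sum = sum + (evenN num.toNat : Int) := by
  induction f with
  | zero => intro num sum h; omega
  | succ f ih =>
    intro num sum h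
    rw [sumEvenLoopF]
    split
    · rename_i hpos
      rw [PySem.Int.floordiv_eq_ediv_of_pos (by norm_num),
          PySem.Int.mod_eq_emod_of_pos (by norm_num), PySem.Int.mod_eq_emod_of_pos (by norm_num)]
      rw [ih (num / 10) _ (by omega)]
      have h0 : num.toNat ≠ 0 := by omega
      conv_rhs => rw [evenN]
      rw [dif_neg h0]
      have e1 : num % 10 = ((num.toNat % 10 : Nat) : Int) := by omega
      have e2 : (num / 10).toNat = num.toNat / 10 := by omega
      rw [e1, e2]
      have e3 : ((num.toNat % 10 : Nat) : Int) % 2 = ((num.toNat % 10 % 2 : Nat) : Int) := by omega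
      rw [e3]
      split <;> rename_i h4
      · rw [if_pos (by omega)]; push_cast; ring
      · rw [if_neg (by omega)]; push_cast; ring
    · rename_i hpos
      have h0 : num.toNat = 0 := by omega
      rw [h0, evenN_zero]
      simp

theorem sumEvenLoop_eq (num sum : Int) : sumEvenLoop num sum = sum + (evenN num.toNat : Int) :=
  sumEvenLoopF_eq (num.toNat + 1) num sum (by omega)

-- chars of Nat.toDigits 10, as a structural recursion
def rep (n : Nat) : List Char :=
  if h : n / 10 = 0 then [Nat.digitChar (n % 10)]
  else rep (n / 10) ++ [Nat.digitChar (n % 10)]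
termination_by n
decreasing_by omega

theorem toDigitsCore_eq (f : Nat) : ∀ (n : Nat) (ds : List Char), n < f →
    Nat.toDigitsCore 10 f n ds = rep n ++ ds := by
  induction f with
  | zero => intro n ds h; omega
  | succ f ih =>
    intro n ds h
    rw [Nat.toDigitsCore, rep]
    split
    · simp
    · rw [ih (n / 10) _ (by omega)]
      simp

theorem toDigits_eq (n : Nat) : Nat.toDigits 10 n = rep n := by
  rw [Nat.toDigits, toDigitsCore_eq (n + 1) n [] (by omega)]; simp

theorem evenCharsSum_singleton (d : Nat) (h : d < 10) :
    evenCharsSum [Nat.digitChar d] = if d % 2 = 0 then (d : Int) else 0 := by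
  interval_cases d <;> decide

theorem evenCharsSum_append (xs ys : List Char) :
    evenCharsSum (xs ++ ys) = evenCharsSum xs + evenCharsSum ys := by
  simp [evenCharsSum, List.filter_append]

theorem evenCharsSum_rep (n : Nat) : evenCharsSum (rep n) = (evenN n : Int) := by
  induction n using Nat.strong_induction_on with
  | _ n ih =>
    rw [rep]
    split
    · rename_i h0
      rw [evenCharsSum_singleton (n % 10) (by omega)]
      by_cases hn0 : n = 0
      · subst hn0; simp [evenN_zero]
      · rw [evenN, dif_neg hn0, show n / 10 = 0 from h0, evenN_zero]
        split <;> rename_i hh <;> simp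
    · rename_i h0
      rw [evenCharsSum_append, ih (n / 10) (by omega),
        evenCharsSum_singleton (n % 10) (by omega)]
      conv_rhs => rw [evenN]
      rw [dif_neg (show n ≠ 0 by omega)]
      split <;> rename_i hh <;> push_cast <;> ring

theorem evenCharsSum_toStr (num : Int) (h : 0 ≤ num) :
    evenCharsSum (PySem.Int.toStr num).toList = (evenN num.toNat : Int) := by
  rw [PySem.Int.toList_toStr, PySem.Int.toChars, if_neg (by omega), toDigits_eq,
    evenCharsSum_rep]

theorem outerF_eq_altF (f : Nat) : ∀ (num : Int), num.toNat < f →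
    sumEvenOuterF f num = sumEvenAltF f num := by
  induction f with
  | zero => intro num h; omega
  | succ f ih =>
    intro num h
    rw [sumEvenOuterF, sumEvenAltF]
    by_cases h9 : num > 9
    · rw [if_pos h9, if_neg (by omega)]
      rw [sumEvenLoop_eq num 0, zero_add, evenCharsSum_toStr num (by omega)]
      have := evenN_lt num.toNat (by omega)
      exact ih _ (by omega)
    · rw [if_neg h9, if_pos (by omega)]

theorem main_eq (num : Int) : sum_even_digits num = sum_even_digits_alt num :=
  outerF_eq_altF (num.toNat + 1) num (by omega)

-- ===== VERDICT (by name: the statement is the Claim_ definition above) =====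
theorem sum_even_digits_spec : Claim_equal_sum_even_digits := by
  intro num _
  unfold Spec_sum_even_digits
  exact main_eq num
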